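-- pv_equiv track=rewrite | github.com/Hoouoo/Backjoon_Python | bj1668.py | cntTrophy
-- ===== SOURCE A (Python) =====
-- def cntTrophy(list1):
--     flag = list1[0]  # 마지막 높이 값을 flag에 저장
--     cnt = 1
--     for i in range(1, len(list1)):
--         if flag > list1[i]:  # 가려서 안 보이는 경우
--             continue
--         elif flag == list1[i]:
--             continue
--         else:  # 보이는 경우
--             cnt += 1
--             flag = list1[i]
--     return cnt
-- ===== SOURCE B (Python) =====
-- def cntTrophy(list1):
--     # Build the running-maximum table, then count positions where it strictly rises.
--     m = list1[0]
--     runmax = []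
--     for x in list1:
--         if x > m:
--             m = x
--         runmax.append(m)
--     return 1 + sum(a != b for a, b in zip(runmax, runmax[1:]))
-- ===== Notes on version B (the rewrite author's own statement) =====
-- stated objective: alternative
-- what changed: B builds the prefix-maximum table first and then counts positions where it strictly increases, instead of A's inline compare-and-update counting loop.
import Mathlib
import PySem

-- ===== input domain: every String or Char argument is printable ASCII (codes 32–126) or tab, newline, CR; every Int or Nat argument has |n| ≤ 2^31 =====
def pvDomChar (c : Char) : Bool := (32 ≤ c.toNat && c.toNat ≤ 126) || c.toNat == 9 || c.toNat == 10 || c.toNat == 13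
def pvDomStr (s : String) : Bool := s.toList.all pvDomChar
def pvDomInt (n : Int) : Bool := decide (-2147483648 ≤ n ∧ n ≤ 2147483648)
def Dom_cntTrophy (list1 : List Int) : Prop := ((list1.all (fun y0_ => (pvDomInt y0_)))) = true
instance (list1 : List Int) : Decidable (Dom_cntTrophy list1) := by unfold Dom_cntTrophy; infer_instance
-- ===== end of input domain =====

-- B replaces A's inline compare-and-update loop by building the prefix-maximum
-- table and counting its strict rises (objective: alternative decomposition).

-- ===== PORT A =====
-- flag = list1[0]; cnt = 1; loop over the remaining elements in order,
-- bumping cnt and flag when the new element is strictly larger.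
def cntTrophy (list1 : List Int) : Int :=
  match list1 with
  | [] => 0  -- unreachable: Python raises IndexError; excluded by Pre_cntTrophy
  | x :: rest =>
    (rest.foldl
      (fun (st : Int × Int) v =>
        if st.1 > v then st
        else if st.1 = v then st
        else (v, st.2 + 1))
      (x, 1)).2

-- ===== PORT B =====
-- Source B: build runmax list with a fold carrying (current max, table so far),
-- then 1 + count of adjacent pairs (zip runmax runmax[1:]) that differ.
def cntTrophy_alt (list1 : List Int) : Int :=
  match list1 with
  | [] => 0  -- unreachable: Source B raises IndexError on list1[0]; excluded by Pre_cntTrophy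
  | x :: _ =>
    let runmax :=
      (list1.foldl
        (fun (st : Int × List Int) v =>
          let m := if v > st.1 then v else st.1
          (m, st.2 ++ [m]))
        (x, [])).2
    1 + ((runmax.zip (runmax.drop 1)).foldl
          (fun (c : Int) p => c + (if p.1 ≠ p.2 then 1 else 0)) 0)

-- ===== PRECONDITION & SPEC =====
-- Pre_ excludes only the empty list, on which A raises IndexError (list1[0]).
def Pre_cntTrophy (list1 : List Int) : Prop := list1 ≠ []
instance (list1 : List Int) : Decidable (Pre_cntTrophy list1) := by unfold Pre_cntTrophy; infer_instance
def pvWitness_cntTrophy : List Int := ([3, 1, 4, 4, 5])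

def Spec_cntTrophy (list1 : List Int) (out : Int) : Prop := out = cntTrophy_alt list1
instance (list1 : List Int) (out : Int) : Decidable (Spec_cntTrophy list1 out) := by unfold Spec_cntTrophy; infer_instance

-- ===== CLAIM (what is proved, stated in full; the proofs are below) =====
def Claim_equal_cntTrophy : Prop := ∀ (list1 : List Int), Dom_cntTrophy list1 → Pre_cntTrophy list1 → Spec_cntTrophy list1 (cntTrophy list1)

-- ===== LEMMAS AND PROOFS =====

-- common recursive characterisation: number of strict rises of the running max
def pvRises (m : Int) : List Int → Int
  | [] => 0
  | v :: l => if m < v then 1 + pvRises v l else pvRises m l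

-- the running-maximum table
def pvRml (m : Int) : List Int → List Int
  | [] => []
  | v :: l => let m' := if v > m then v else m; m' :: pvRml m' l

lemma cntTrophy_loop (l : List Int) : ∀ (m c : Int),
    (l.foldl
      (fun (st : Int × Int) v =>
        if st.1 > v then st
        else if st.1 = v then st
        else (v, st.2 + 1))
      (m, c)).2 = c + pvRises m l := by
  induction l with
  | nil => intro m c; simp [pvRises]
  | cons v l ih =>
    intro m c
    simp only [List.foldl_cons, pvRises]
    by_cases h1 : m > v
    · rw [if_pos h1, ih, if_neg (by omega)]
    · rw [if_neg h1]
      by_cases h2 : m = v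
      · rw [if_pos h2, ih, if_neg (by omega)]
      · rw [if_neg h2, ih, if_pos (by omega)]; ring

lemma rml_fold (l : List Int) : ∀ (m : Int) (acc : List Int),
    (l.foldl
      (fun (st : Int × List Int) v =>
        let m := if v > st.1 then v else st.1
        (m, st.2 ++ [m]))
      (m, acc)).2 = acc ++ pvRml m l := by
  induction l with
  | nil => intro m acc; simp [pvRml]
  | cons v l ih =>
    intro m acc
    simp only [List.foldl_cons, pvRml]
    rw [ih]
    simp

lemma zip_count (l : List Int) : ∀ (m c : Int),
    (((m :: pvRml m l).zip (pvRml m l)).foldl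
      (fun (c : Int) p => c + (if p.1 ≠ p.2 then 1 else 0)) c) = c + pvRises m l := by
  induction l with
  | nil => intro m c; simp [pvRml, pvRises]
  | cons v l ih =>
    intro m c
    simp only [pvRml, pvRises, List.zip_cons_cons, List.foldl_cons]
    by_cases h : v > m
    · rw [if_pos h, if_pos (by omega : m < v), ih]
      rw [if_pos (by omega : m ≠ v)]
      ring
    · rw [if_neg h, if_neg (by omega : ¬ m < v), ih]
      rw [if_neg (by omega : ¬ m ≠ m)]
      ring

-- ===== VERDICT (by name: the statement is the Claim_ definition above) =====
theorem cntTrophy_spec : Claim_equal_cntTrophy := by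
  intro list1 _ hpre
  unfold Spec_cntTrophy cntTrophy cntTrophy_alt
  match list1 with
  | [] => exact absurd rfl hpre
  | x :: rest =>
    simp only
    rw [cntTrophy_loop]
    have hr : ((x :: rest).foldl
        (fun (st : Int × List Int) v =>
          let m := if v > st.1 then v else st.1
          (m, st.2 ++ [m]))
        (x, [])).2 = x :: pvRml x rest := by
      rw [rml_fold]
      simp [pvRml]
    rw [hr]
    simp only [List.drop_succ_cons, List.drop_zero]
    rw [zip_count]
    ring
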